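-- pv_equiv track=rewrite | github.com/Tanbir-Hasan-247/competitive-programming | E_Secret_Box.py | count_positions
-- ===== SOURCE A (Python) =====
-- def count_positions(x, y, z, k):
--     count = 0
--     for i in range(1, min(x, k) + 1):
--         if k % i == 0:
--             for j in range(1, min(y, k // i) + 1):
--                 if (k // i) % j == 0 and (k // i) // j <= z:
--                     count += 1
--     return count
-- ===== SOURCE B (Python) =====
-- def count_positions(x, y, z, k):
--     # Enumerate the divisors of k once via the sqrt loop, then count
--     # pairs of divisors (a, b) with a <= x, b | (k // a), b <= y and
--     # (k // a) // b <= z.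
--     divs = []
--     i = 1
--     while i * i <= k:
--         if k % i == 0:
--             divs.append(i)
--             if i != k // i:
--                 divs.append(k // i)
--         i += 1
--     count = 0
--     for a in divs:
--         if a <= x:
--             m = k // a
--             for b in divs:
--                 if b <= y and m % b == 0 and m // b <= z:
--                     count += 1
--     return count
-- ===== Notes on version B (the rewrite author's own statement) =====
-- stated objective: faster
-- what changed: B enumerates the divisors of k once with a sqrt(k) trial loop and then counts over divisor pairs only, instead of A's scan of every i up to min(x,k) with a full inner scan up to k//i.
import Mathlib
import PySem

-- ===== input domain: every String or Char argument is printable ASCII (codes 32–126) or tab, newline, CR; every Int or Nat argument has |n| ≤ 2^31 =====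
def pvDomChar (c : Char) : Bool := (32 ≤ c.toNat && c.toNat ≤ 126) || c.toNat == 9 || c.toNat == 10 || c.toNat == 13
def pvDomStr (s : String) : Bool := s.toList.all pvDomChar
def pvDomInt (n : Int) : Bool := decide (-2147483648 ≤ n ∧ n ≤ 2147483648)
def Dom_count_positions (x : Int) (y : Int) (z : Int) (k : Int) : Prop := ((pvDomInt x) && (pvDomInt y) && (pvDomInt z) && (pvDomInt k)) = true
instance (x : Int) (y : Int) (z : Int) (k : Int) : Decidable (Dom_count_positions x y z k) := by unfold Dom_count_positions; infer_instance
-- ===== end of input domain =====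

-- B replaces A's scan of every candidate up to min(x,k) (each with an inner scan up to
-- min(y, k//i)) by one sqrt(k) divisor enumeration followed by a count over divisor
-- pairs only (objective: faster).

-- ===== PORT A =====
def count_positions (x : Int) (y : Int) (z : Int) (k : Int) : Int :=
  (PySem.List.pyRange 1 (min x k + 1) 1).foldl (fun count i =>
    if PySem.Int.mod k i = 0 then
      (PySem.List.pyRange 1 (min y (PySem.Int.floordiv k i) + 1) 1).foldl
        (fun count j =>
          if PySem.Int.mod (PySem.Int.floordiv k i) j = 0 ∧
             PySem.Int.floordiv (PySem.Int.floordiv k i) j ≤ z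
          then count + 1 else count) count
    else count) 0

-- ===== PORT B =====
-- 'while i * i <= k': collect divisor i and its cofactor k // i (Source B's sqrt loop)
def collectDivs (k : Int) (i : Int) (acc : List Int) : List Int :=
  if _h : i * i ≤ k then
    collectDivs k (i + 1)
      (if PySem.Int.mod k i = 0 then
         (acc ++ [i]) ++
           (if i ≠ PySem.Int.floordiv k i then [PySem.Int.floordiv k i] else [])
       else acc)
  else acc
termination_by (k + 1 - i).toNat
decreasing_by
  have hik : i ≤ k := by
    rcases (by omega : i ≤ 0 ∨ 0 < i) with h0 | h0
    · exact le_trans h0 (le_trans (mul_self_nonneg i) _h)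
    · exact le_trans (le_mul_of_one_le_left (by omega) (by omega)) _h
  omega

def count_positions_alt (x : Int) (y : Int) (z : Int) (k : Int) : Int :=
  let divs := collectDivs k 1 []
  divs.foldl (fun count a =>
    if a ≤ x then
      let m := PySem.Int.floordiv k a
      divs.foldl (fun count b =>
        if b ≤ y ∧ PySem.Int.mod m b = 0 ∧ PySem.Int.floordiv m b ≤ z
        then count + 1 else count) count
    else count) 0

-- ===== PRECONDITION & SPEC =====
def Spec_count_positions (x : Int) (y : Int) (z : Int) (k : Int) (out : Int) : Prop := out = count_positions_alt x y z k
instance (x : Int) (y : Int) (z : Int) (k : Int) (out : Int) : Decidable (Spec_count_positions x y z k out) := by unfold Spec_count_positions; infer_instance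

-- ===== CLAIM (what is proved, stated in full; the proofs are below) =====
def Claim_equal_count_positions : Prop := ∀ (x : Int) (y : Int) (z : Int) (k : Int), Dom_count_positions x y z k → Spec_count_positions x y z k (count_positions x y z k)

-- ===== LEMMAS AND PROOFS =====

-- "d has already been emitted by the sqrt loop once the loop variable reached i":
-- d is a positive divisor of k seen either directly (d < i) or as a cofactor (k/d < i, i.e. k < d*i).
def goodAt (k i d : Int) : Prop := d ∣ k ∧ 0 < d ∧ (d < i ∨ k < d * i)

theorem goodAt_final (k i d : Int) (hi : 1 ≤ i) (hlt : k < i * i)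
    (hd : d ∣ k) (hdp : 0 < d) : goodAt k i d := by
  refine ⟨hd, hdp, ?_⟩
  rcases (by omega : d < i ∨ i ≤ d) with h | h
  · exact Or.inl h
  · exact Or.inr (lt_of_lt_of_le hlt (mul_le_mul_of_nonneg_right h (by omega)))

theorem goodAt_succ (k i d : Int) (hi : 0 < i) (hk : 0 < k) :
    goodAt k (i + 1) d ↔ goodAt k i d ∨ (i ∣ k ∧ (d = i ∨ d = k / i)) := by
  constructor
  · rintro ⟨hd, hdp, hcase⟩
    by_cases h1 : d < i ∨ k < d * i
    · exact Or.inl ⟨hd, hdp, h1⟩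
    · push_neg at h1
      obtain ⟨hge, hle⟩ := h1
      right
      rcases hcase with hlt | hlt
      · have hdi : d = i := by omega
        subst hdi
        exact ⟨hd, Or.inl rfl⟩
      · have hc : d * (k / d) = k := Int.mul_ediv_cancel' hd
        have hq1 : i ≤ k / d := le_of_mul_le_mul_left (by rw [hc]; exact hle) hdp
        have hq2 : k / d < i + 1 := lt_of_mul_lt_mul_left (by rw [hc]; exact hlt) (le_of_lt hdp)
        have hq : k / d = i := by omega
        have hkdi : k = d * i := by rw [← hc, hq]
        refine ⟨hq ▸ Int.ediv_dvd_of_dvd hd, Or.inr ?_⟩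
        have : k / i = d := by rw [hkdi]; exact Int.mul_ediv_cancel d (by omega)
        omega
  · rintro (⟨hd, hdp, hc⟩ | ⟨hik, hdi⟩)
    · refine ⟨hd, hdp, ?_⟩
      rcases hc with h | h
      · exact Or.inl (by omega)
      · exact Or.inr (by nlinarith)
    · have hm : i * (k / i) = k := Int.mul_ediv_cancel' hik
      rcases hdi with rfl | rfl
      · exact ⟨hik, hi, Or.inl (by omega)⟩
      · have hmp : 0 < k / i := by nlinarith
        refine ⟨Int.ediv_dvd_of_dvd hik, hmp, Or.inr (by nlinarith)⟩

theorem collectDivs_stop (k i : Int) (acc : List Int) (h : ¬ i * i ≤ k) :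
    collectDivs k i acc = acc := by
  unfold collectDivs; rw [dif_neg h]

theorem collectDivs_go (k i : Int) (acc : List Int) (h : i * i ≤ k) :
    collectDivs k i acc = collectDivs k (i + 1)
      (if PySem.Int.mod k i = 0 then
         (acc ++ [i]) ++
           (if i ≠ PySem.Int.floordiv k i then [PySem.Int.floordiv k i] else [])
       else acc) := by
  conv_lhs => unfold collectDivs
  rw [dif_pos h]

theorem collectDivs_spec (k : Int) : ∀ (n : Nat) (i : Int) (acc : List Int),
    (k + 1 - i).toNat ≤ n → 1 ≤ i → acc.Nodup → (∀ d, d ∈ acc ↔ goodAt k i d) →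
    (collectDivs k i acc).Nodup ∧
      ∀ d, d ∈ collectDivs k i acc ↔ (d ∣ k ∧ 0 < d) := by
  intro n
  induction n with
  | zero =>
    intro i acc hn hi hnd hmem
    have hstop : ¬ i * i ≤ k := by nlinarith [(by omega : k + 1 ≤ i)]
    rw [collectDivs_stop k i acc hstop]
    refine ⟨hnd, fun d => ?_⟩
    rw [hmem d]
    exact ⟨fun ⟨a, b, _⟩ => ⟨a, b⟩,
      fun ⟨a, b⟩ => goodAt_final k i d hi (by omega) a b⟩
  | succ n ih =>
    intro i acc hn hi hnd hmem
    by_cases h : i * i ≤ k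
    · have hk : 0 < k := lt_of_lt_of_le (by nlinarith) h
      have hik : i ≤ k := le_trans (le_mul_of_one_le_left (by omega) hi) h
      rw [collectDivs_go k i acc h]
      have hmod : (PySem.Int.mod k i = 0) ↔ i ∣ k := PySem.Int.mod_eq_zero_iff_dvd k i
      have hfd : PySem.Int.floordiv k i = k / i := PySem.Int.floordiv_eq_ediv_of_pos (by omega)
      have hinotin : i ∉ acc := by
        intro hmemi
        rcases (hmem i).1 hmemi with ⟨_, _, hc | hc⟩ <;> omega
      by_cases hdvd : i ∣ k
      · have hm : i * (k / i) = k := Int.mul_ediv_cancel' hdvd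
        have hmp : 0 < k / i := by nlinarith
        have hmnotin : k / i ∉ acc := by
          intro hmemm
          rcases (hmem (k / i)).1 hmemm with ⟨_, _, hc | hc⟩
          · nlinarith
          · nlinarith
        rw [if_pos (hmod.2 hdvd), hfd]
        apply ih (i + 1) _ (by omega) (by omega)
        · by_cases heq : i ≠ k / i
          · rw [if_pos heq]
            rw [List.append_assoc]
            simp only [List.cons_append, List.nil_append, List.nodup_append,
              List.nodup_cons, List.mem_cons, List.not_mem_nil, List.nodup_nil]
            refine ⟨hnd, ⟨by simpa using heq, by simp⟩, ?_⟩
            intro a ha b hb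
            rcases hb with rfl | rfl | hf
            · exact fun hab => hinotin (hab ▸ ha)
            · exact fun hab => hmnotin (hab ▸ ha)
            · exact absurd hf id
          · rw [if_neg heq, List.append_nil]
            refine hnd.append (List.nodup_singleton i) ?_
            intro a ha hb
            rw [List.mem_singleton] at hb
            subst hb
            exact hinotin ha
        · intro d
          rw [goodAt_succ k i d (by omega) hk]
          by_cases heq : i ≠ k / i
          · rw [if_pos heq]
            simp only [List.append_assoc, List.cons_append, List.nil_append,
              List.mem_append, List.mem_cons, List.mem_singleton, List.not_mem_nil]
            rw [hmem d]
            constructor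
            · rintro (hg | rfl | rfl | hf)
              · exact Or.inl hg
              · exact Or.inr ⟨hdvd, Or.inl rfl⟩
              · exact Or.inr ⟨hdvd, Or.inr rfl⟩
              · cases hf
            · rintro (hg | ⟨_, rfl | rfl⟩)
              · exact Or.inl hg
              · exact Or.inr (Or.inl rfl)
              · exact Or.inr (Or.inr (Or.inl rfl))
          · rw [if_neg heq]
            push_neg at heq
            rw [List.append_nil]
            simp only [List.mem_append, List.mem_singleton]
            rw [hmem d]
            constructor
            · rintro (hg | rfl)
              · exact Or.inl hg
              · exact Or.inr ⟨hdvd, Or.inl rfl⟩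
            · rintro (hg | ⟨_, rfl | rfl⟩)
              · exact Or.inl hg
              · exact Or.inr rfl
              · exact Or.inr heq.symm
      · rw [if_neg (fun hc => hdvd (hmod.1 hc))]
        apply ih (i + 1) _ (by omega) (by omega) hnd
        intro d
        rw [goodAt_succ k i d (by omega) hk, hmem d]
        constructor
        · exact Or.inl
        · rintro (hg | ⟨hik', _⟩)
          · exact hg
          · exact absurd hik' hdvd
    · rw [collectDivs_stop k i acc h]
      push_neg at h
      refine ⟨hnd, fun d => ?_⟩
      rw [hmem d]
      exact ⟨fun ⟨a, b, _⟩ => ⟨a, b⟩,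
        fun ⟨a, b⟩ => goodAt_final k i d hi h a b⟩

theorem collectDivs_nil (k : Int) (hk : k ≤ 0) : collectDivs k 1 [] = [] := by
  rw [collectDivs_stop k 1 [] (by omega)]

theorem divs_spec (k : Int) :
    (collectDivs k 1 []).Nodup ∧
      ∀ d, d ∈ collectDivs k 1 [] ↔ (1 ≤ k ∧ d ∣ k ∧ 0 < d) := by
  rcases (by omega : k ≤ 0 ∨ 1 ≤ k) with hk | hk
  · rw [collectDivs_nil k hk]
    refine ⟨List.nodup_nil, fun d => ?_⟩
    simp only [List.not_mem_nil, false_iff]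
    rintro ⟨h1, _⟩
    omega
  · have hmem0 : ∀ d, d ∈ ([] : List Int) ↔ goodAt k 1 d := by
      intro d
      simp only [List.not_mem_nil, false_iff]
      rintro ⟨hd, hdp, hc | hc⟩
      · omega
      · rw [mul_one] at hc
        have := Int.le_of_dvd (by omega) hd
        omega
    obtain ⟨h1, h2⟩ := collectDivs_spec k (k + 1 - 1).toNat 1 [] le_rfl le_rfl
      List.nodup_nil hmem0
    refine ⟨h1, fun d => ?_⟩
    rw [h2 d]
    exact ⟨fun ⟨a, b⟩ => ⟨hk, a, b⟩, fun ⟨_, a, b⟩ => ⟨a, b⟩⟩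

theorem sum_map_ite_zero {α : Type} (p : α → Prop) [DecidablePred p] (f : α → Int)
    (l : List α) :
    (l.map (fun x => if p x then f x else 0)).sum
      = ((l.filter (fun x => decide (p x))).map f).sum := by
  induction l with
  | nil => rfl
  | cons a l ih =>
    by_cases h : p a <;> simp [h, ih]

theorem count_A_sum (x y z k : Int) :
    count_positions x y z k =
      (((PySem.List.pyRange 1 (min x k + 1) 1).filter
          (fun i => decide (PySem.Int.mod k i = 0))).map
        (fun i => ((PySem.List.pyRange 1 (min y (PySem.Int.floordiv k i) + 1) 1).countP
          (fun j => decide (PySem.Int.mod (PySem.Int.floordiv k i) j = 0 ∧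
            PySem.Int.floordiv (PySem.Int.floordiv k i) j ≤ z)) : Int))).sum := by
  unfold count_positions
  have h1 : ∀ (c i : Int), i ∈ PySem.List.pyRange 1 (min x k + 1) 1 →
      (if PySem.Int.mod k i = 0 then
        (PySem.List.pyRange 1 (min y (PySem.Int.floordiv k i) + 1) 1).foldl
          (fun count j =>
            if PySem.Int.mod (PySem.Int.floordiv k i) j = 0 ∧
               PySem.Int.floordiv (PySem.Int.floordiv k i) j ≤ z
            then count + 1 else count) c
      else c)
      = c + (if PySem.Int.mod k i = 0 then
          ((PySem.List.pyRange 1 (min y (PySem.Int.floordiv k i) + 1) 1).countP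
            (fun j => decide (PySem.Int.mod (PySem.Int.floordiv k i) j = 0 ∧
              PySem.Int.floordiv (PySem.Int.floordiv k i) j ≤ z)) : Int)
        else 0) := by
    intro c i _
    by_cases hm : PySem.Int.mod k i = 0
    · rw [if_pos hm, if_pos hm, PySem.List.foldl_ite_add_one]
    · rw [if_neg hm, if_neg hm, add_zero]
  refine Eq.trans (PySem.List.foldl_congr_mem _ _ _ _ h1) ?_
  rw [PySem.List.foldl_add, zero_add, sum_map_ite_zero]

theorem count_B_sum (x y z k : Int) :
    count_positions_alt x y z k =
      (((collectDivs k 1 []).filter (fun a => decide (a ≤ x))).map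
        (fun a => ((collectDivs k 1 []).countP
          (fun b => decide (b ≤ y ∧ PySem.Int.mod (PySem.Int.floordiv k a) b = 0 ∧
            PySem.Int.floordiv (PySem.Int.floordiv k a) b ≤ z)) : Int))).sum := by
  unfold count_positions_alt
  have h1 : ∀ (c a : Int), a ∈ collectDivs k 1 [] →
      (if a ≤ x then
        (collectDivs k 1 []).foldl
          (fun count b =>
            if b ≤ y ∧ PySem.Int.mod (PySem.Int.floordiv k a) b = 0 ∧
               PySem.Int.floordiv (PySem.Int.floordiv k a) b ≤ z
            then count + 1 else count) c
      else c)
      = c + (if a ≤ x then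
          ((collectDivs k 1 []).countP
            (fun b => decide (b ≤ y ∧ PySem.Int.mod (PySem.Int.floordiv k a) b = 0 ∧
              PySem.Int.floordiv (PySem.Int.floordiv k a) b ≤ z)) : Int)
        else 0) := by
    intro c a _
    by_cases hm : a ≤ x
    · rw [if_pos hm, if_pos hm, PySem.List.foldl_ite_add_one]
    · rw [if_neg hm, if_neg hm, add_zero]
  refine Eq.trans (PySem.List.foldl_congr_mem _ _ _ _ h1) ?_
  rw [PySem.List.foldl_add, zero_add, sum_map_ite_zero]

theorem counts_eq (x y z k : Int) :
    count_positions x y z k = count_positions_alt x y z k := by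
  obtain ⟨hLnd, hLmem⟩ := divs_spec k
  rw [count_A_sum, count_B_sum]
  rcases (by omega : k ≤ 0 ∨ 1 ≤ k) with hk | hk
  · have hxk : min x k + 1 ≤ 1 := by have := min_le_right x k; omega
    rw [collectDivs_nil k hk, PySem.List.pyRange_one_eq_nil hxk]
    simp
  · have houter : ((PySem.List.pyRange 1 (min x k + 1) 1).filter
        (fun i => decide (PySem.Int.mod k i = 0))).Perm
        ((collectDivs k 1 []).filter (fun a => decide (a ≤ x))) := by
      rw [List.perm_ext_iff_of_nodup
        ((PySem.List.nodup_pyRange_one _ _).filter _) (hLnd.filter _)]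
      intro d
      simp only [List.mem_filter, PySem.List.mem_pyRange_one, decide_eq_true_eq,
        hLmem d, PySem.Int.mod_eq_zero_iff_dvd]
      constructor
      · rintro ⟨⟨h1, h2⟩, h3⟩
        have := min_le_left x k
        exact ⟨⟨hk, h3, by omega⟩, by omega⟩
      · rintro ⟨⟨_, h3, h4⟩, h5⟩
        have h6 := Int.le_of_dvd (by omega) h3
        have := le_min (α := Int) h5 h6
        exact ⟨⟨by omega, by omega⟩, h3⟩
    have hinner : ∀ d ∈ (PySem.List.pyRange 1 (min x k + 1) 1).filter
        (fun i => decide (PySem.Int.mod k i = 0)),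
        ((PySem.List.pyRange 1 (min y (PySem.Int.floordiv k d) + 1) 1).countP
          (fun j => decide (PySem.Int.mod (PySem.Int.floordiv k d) j = 0 ∧
            PySem.Int.floordiv (PySem.Int.floordiv k d) j ≤ z)) : Int)
          = ((collectDivs k 1 []).countP
          (fun b => decide (b ≤ y ∧ PySem.Int.mod (PySem.Int.floordiv k d) b = 0 ∧
            PySem.Int.floordiv (PySem.Int.floordiv k d) b ≤ z)) : Int) := by
      intro d hd
      simp only [List.mem_filter, PySem.List.mem_pyRange_one, decide_eq_true_eq,
        PySem.Int.mod_eq_zero_iff_dvd] at hd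
      obtain ⟨⟨hd1, _⟩, hdvd⟩ := hd
      have hfd : PySem.Int.floordiv k d = k / d :=
        PySem.Int.floordiv_eq_ediv_of_pos (by omega)
      have hm : d * (k / d) = k := Int.mul_ediv_cancel' hdvd
      have hmpos : 0 < k / d := by nlinarith
      have hmdvdk : k / d ∣ k := Int.ediv_dvd_of_dvd hdvd
      rw [hfd]
      have hp : ((PySem.List.pyRange 1 (min y (k / d) + 1) 1).filter
          (fun j => decide (PySem.Int.mod (k / d) j = 0 ∧
            PySem.Int.floordiv (k / d) j ≤ z))).Perm
          ((collectDivs k 1 []).filter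
          (fun b => decide (b ≤ y ∧ PySem.Int.mod (k / d) b = 0 ∧
            PySem.Int.floordiv (k / d) b ≤ z))) := by
        rw [List.perm_ext_iff_of_nodup
          ((PySem.List.nodup_pyRange_one _ _).filter _) (hLnd.filter _)]
        intro b
        simp only [List.mem_filter, PySem.List.mem_pyRange_one, decide_eq_true_eq,
          hLmem b, PySem.Int.mod_eq_zero_iff_dvd]
        constructor
        · rintro ⟨⟨h1, h2⟩, h3, h4⟩
          have := min_le_left y (k / d)
          exact ⟨⟨hk, dvd_trans h3 hmdvdk, by omega⟩, by omega, h3, h4⟩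
        · rintro ⟨⟨_, _, h5⟩, h6, h7, h8⟩
          have h9 := Int.le_of_dvd hmpos h7
          have := le_min (α := Int) h6 h9
          exact ⟨⟨by omega, by omega⟩, h7, h8⟩
      rw [List.countP_eq_length_filter, List.countP_eq_length_filter, hp.length_eq]
    calc (((PySem.List.pyRange 1 (min x k + 1) 1).filter
            (fun i => decide (PySem.Int.mod k i = 0))).map
          (fun i => ((PySem.List.pyRange 1 (min y (PySem.Int.floordiv k i) + 1) 1).countP
            (fun j => decide (PySem.Int.mod (PySem.Int.floordiv k i) j = 0 ∧
              PySem.Int.floordiv (PySem.Int.floordiv k i) j ≤ z)) : Int))).sum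
        = (((PySem.List.pyRange 1 (min x k + 1) 1).filter
            (fun i => decide (PySem.Int.mod k i = 0))).map
          (fun a => ((collectDivs k 1 []).countP
            (fun b => decide (b ≤ y ∧ PySem.Int.mod (PySem.Int.floordiv k a) b = 0 ∧
              PySem.Int.floordiv (PySem.Int.floordiv k a) b ≤ z)) : Int))).sum := by
          rw [List.map_congr_left hinner]
      _ = _ := (houter.map _).sum_eq

-- ===== VERDICT (by name: the statement is the Claim_ definition above) =====
theorem count_positions_spec : Claim_equal_count_positions := by
  intro x y z k _
  unfold Spec_count_positions
  exact counts_eq x y z k
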